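-- pv_equiv track=rewrite | github.com/mruduladevaguptapu2000/Operarioai | api/agent/tools/create_pdf.py | _consume_srcset_url
-- ===== SOURCE A (Python) =====
-- def _consume_srcset_url(value: str, start: int) -> tuple[str, int]:
--     if value[start:start + 5].lower() == "data:":
--         idx = start + 5
--         while idx < len(value) and value[idx] not in " \t\r\n":
--             idx += 1
--         return value[start:idx], idx
--     idx = start
--     while idx < len(value) and value[idx] not in " \t\r\n,":
--         idx += 1
--     return value[start:idx], idx
-- ===== SOURCE B (Python) =====
-- _STOPS = " \t\r\n"
--
--
-- def _consume_srcset_url(value: str, start: int) -> tuple[str, int]: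
--     # Find the cut point with per-stop-character str.find calls instead of
--     # advancing an index one character at a time.
--     if value[start:start + 5].lower() == "data:":
--         base, stops = start + 5, _STOPS
--     else:
--         base, stops = start, _STOPS + ","
--     rest = value[base:]
--     cut = min((pos for pos in map(rest.find, stops) if pos != -1),
--               default=len(rest))
--     idx = base + cut
--     return value[start:idx], idx
-- ===== Notes on version B (the rewrite author's own statement) =====
-- stated objective: faster
-- what changed: Replaces A's per-character index-advancing while-loops by slicing the tail once and taking the minimum of one C-level str.find per stop character (default len), deriving the end index arithmetically.
-- outside the precondition, e.g. on _consume_srcset_url('ab', -1): A returns ('b', 2), B returns ('', 0)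
import Mathlib
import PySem

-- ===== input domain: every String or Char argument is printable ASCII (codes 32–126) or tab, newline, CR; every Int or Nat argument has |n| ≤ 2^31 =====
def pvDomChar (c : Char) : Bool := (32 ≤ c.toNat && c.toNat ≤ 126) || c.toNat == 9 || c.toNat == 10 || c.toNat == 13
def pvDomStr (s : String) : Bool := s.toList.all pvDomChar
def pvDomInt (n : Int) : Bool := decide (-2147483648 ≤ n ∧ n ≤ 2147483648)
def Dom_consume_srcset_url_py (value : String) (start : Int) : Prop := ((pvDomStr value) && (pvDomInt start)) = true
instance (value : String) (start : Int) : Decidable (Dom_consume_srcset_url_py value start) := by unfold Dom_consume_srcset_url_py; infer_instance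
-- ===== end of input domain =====

-- B replaces A's per-character index-advancing scans by per-stop-character str.find calls
-- combined with min (measured faster by a constant factor); return-value equivalence proved for start ≥ 0.

-- ===== PORT A =====
-- while idx < len(value) and value[idx] not in stops: idx += 1   (value[idx] via pyGet?;
-- the 'none' case is Python's IndexError, reachable only for idx < -len, outside Pre_)
def srcsetScan (vl : List Char) (stops : List Char) (idx : Int) : Int :=
  if _h : idx < (vl.length : Int) then
    match PySem.List.pyGet? vl idx with
    | some c => if c ∈ stops then idx else srcsetScan vl stops (idx + 1)
    | none => idx
  else idx
termination_by ((vl.length : Int) - idx).toNat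
decreasing_by omega

def consume_srcset_url_py (value : String) (start : Int) : String × Int :=
  let vl := value.toList
  if PySem.Chars.lower (PySem.List.slice vl (some start) (some (start + 5))) = "data:".toList then
    let idx := srcsetScan vl (" \t\r\n".toList) (start + 5)
    (String.ofList (PySem.List.slice vl (some start) (some idx)), idx)
  else
    let idx := srcsetScan vl (" \t\r\n,".toList) start
    (String.ofList (PySem.List.slice vl (some start) (some idx)), idx)

-- ===== PORT B =====
-- min((pos for pos in map(rest.find, stops) if pos != -1), default=len(rest));
-- ported as a foldl min starting from len(rest): exact, since every kept find is < len(rest).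
def srcsetCut (rest : List Char) (stops : List Char) : Int :=
  ((stops.map (fun c => PySem.Chars.find rest [c])).filter (fun p => p ≠ -1)).foldl
    min (rest.length : Int)

def consume_srcset_url_py_alt (value : String) (start : Int) : String × Int :=
  let vl := value.toList
  let bs : Int × List Char :=
    if PySem.Chars.lower (PySem.List.slice vl (some start) (some (start + 5))) = "data:".toList then
      (start + 5, " \t\r\n".toList)
    else
      (start, " \t\r\n,".toList)
  let rest := PySem.List.slice vl (some bs.1) none
  let idx := bs.1 + srcsetCut rest bs.2
  (String.ofList (PySem.List.slice vl (some start) (some idx)), idx)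

-- ===== PRECONDITION & SPEC =====
-- Pre_ excludes negative start, outside the tokenizer's natural domain: for start < -len(value)
-- A raises IndexError, and for -len(value) ≤ start < 0 both results follow from unspecified
-- negative-index conventions (A's subscript wraps to the end of the string while its slices
-- clamp; B clamps throughout) — a corner no caller of an srcset tokenizer exercises, and
-- neither value is specified.
def Pre_consume_srcset_url_py (value : String) (start : Int) : Prop := 0 ≤ start
instance (value : String) (start : Int) : Decidable (Pre_consume_srcset_url_py value start) := by
  unfold Pre_consume_srcset_url_py; infer_instance

def pvWitness_consume_srcset_url_py : String × Int := ("data:image/png;a,b c", 0)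

def Spec_consume_srcset_url_py (value : String) (start : Int) (out : String × Int) : Prop :=
  out = consume_srcset_url_py_alt value start
instance (value : String) (start : Int) (out : String × Int) :
    Decidable (Spec_consume_srcset_url_py value start out) := by
  unfold Spec_consume_srcset_url_py; infer_instance

-- ===== CLAIM (what is proved, stated in full; the proof is below) =====
def Claim_equal_consume_srcset_url_py : Prop :=
  ∀ (value : String) (start : Int), Dom_consume_srcset_url_py value start →
    Pre_consume_srcset_url_py value start →
    Spec_consume_srcset_url_py value start (consume_srcset_url_py value start)

-- ===== LEMMAS AND PROOFS =====

lemma singleton_prefix_iff (c : Char) (l : List Char) : [c] <+: l ↔ l.head? = some c := by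
  cases l with
  | nil => simp
  | cons a t => simp [List.cons_prefix_cons, eq_comm]

lemma singleton_infix_iff (c : Char) (l : List Char) : [c] <:+: l ↔ c ∈ l := by
  constructor
  · intro h; exact h.mem (List.mem_singleton_self c)
  · intro h
    obtain ⟨s, t, rfl⟩ := List.append_of_mem h
    exact ⟨s, t, by simp⟩

lemma foldl_min_eq (L : List Int) (d j : Int) (hd : j ≤ d)
    (hall : ∀ x ∈ L, j ≤ x) (hmem : j = d ∨ j ∈ L) : L.foldl min d = j := by
  induction L generalizing d with
  | nil =>
    simp only [List.foldl_nil]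
    rcases hmem with h | h
    · omega
    · simp at h
  | cons x t ih =>
    simp only [List.foldl_cons]
    have hx : j ≤ x := hall x (by simp)
    rcases hmem with h | h
    · exact ih (min d x) (by omega) (fun y hy => hall y (by simp [hy])) (Or.inl (by omega))
    · rcases List.mem_cons.mp h with rfl | h
      · exact ih (min d j) (by omega) (fun y hy => hall y (by simp [hy])) (Or.inl (by omega))
      · exact ih (min d x) (by omega) (fun y hy => hall y (by simp [hy])) (Or.inr h)

lemma srcsetScan_eq (vl stops : List Char) (i : Nat) :
    srcsetScan vl stops (i : Int) = (i : Int) + ((vl.drop i).findIdx (fun c => c ∈ stops) : Nat) := by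
  generalize hn : vl.length - i = n
  induction n generalizing i with
  | zero =>
    have hi : ¬ ((i : Int) < (vl.length : Int)) := by omega
    rw [srcsetScan, dif_neg hi, List.drop_of_length_le (by omega)]
    simp [List.findIdx]
  | succ n ih =>
    have hi : i < vl.length := by omega
    have hget : PySem.List.pyGet? vl (i : Int) = some vl[i] := by
      simp [PySem.List.pyGet?_natCast, List.getElem?_eq_getElem hi]
    rw [srcsetScan, dif_pos (by exact_mod_cast hi), hget]
    rw [List.drop_eq_getElem_cons hi, List.findIdx_cons]
    by_cases hc : vl[i] ∈ stops
    · simp [hc]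
    · simp only [hc, decide_false, cond_false]
      have h1 : ((i : Int) + 1) = ((i + 1 : Nat) : Int) := by push_cast; ring
      simp only [if_false]
      rw [h1, ih (i + 1) (by omega)]
      push_cast; ring

lemma srcsetCut_eq (rest stops : List Char) :
    srcsetCut rest stops = ((rest.findIdx (fun c => c ∈ stops) : Nat) : Int) := by
  unfold srcsetCut
  set j := rest.findIdx (fun c => c ∈ stops) with hj
  have hjlen : j ≤ rest.length := List.findIdx_le_length
  have hall : ∀ x ∈ (stops.map (fun c => PySem.Chars.find rest [c])).filter (fun p => p ≠ -1),
      (j : Int) ≤ x := by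
    intro x hx
    simp only [List.mem_filter, List.mem_map, decide_not] at hx
    obtain ⟨⟨c, hc, rfl⟩, hne⟩ := hx
    have hne' : PySem.Chars.find rest [c] ≠ -1 := by
      intro h; simp [h] at hne
    have hnn : 0 ≤ PySem.Chars.find rest [c] := by
      rw [PySem.Chars.find_nonneg_iff]
      exact (PySem.Chars.find_ne_neg_one_iff _ _).mp hne'
    obtain ⟨hpre, _⟩ := PySem.Chars.find_spec hnn
    by_contra hlt
    push_neg at hlt
    have hflt : (PySem.Chars.find rest [c]).toNat < j := by omega
    have hhead : rest[(PySem.Chars.find rest [c]).toNat]? = some c := by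
      rw [← List.head?_drop]
      exact (singleton_prefix_iff c _).mp hpre
    have hmemidx : ((PySem.Chars.find rest [c]).toNat) < rest.length := by
      by_contra hge
      rw [List.getElem?_eq_none (by omega)] at hhead
      simp at hhead
    rw [hj] at hflt
    have := List.not_of_lt_findIdx hflt
    rw [List.getElem?_eq_getElem hmemidx] at hhead
    have : ¬ (rest[(PySem.Chars.find rest [c]).toNat] ∈ stops) := by simpa using this
    exact this (by rw [Option.some.injEq] at hhead; rw [hhead]; exact hc)
  by_cases hlt : j < rest.length
  · -- rest[j] is a stop char; its find equals j and sits in the filtered list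
    have hp : rest[j] ∈ stops := by
      have := List.findIdx_getElem (w := hlt)
      simpa using this
    have hmemr : rest[j] ∈ rest := List.getElem_mem _
    have hnn : 0 ≤ PySem.Chars.find rest [rest[j]] := by
      rw [PySem.Chars.find_nonneg_iff, singleton_infix_iff]
      exact hmemr
    obtain ⟨_, hmin⟩ := PySem.Chars.find_spec hnn
    have hle : (PySem.Chars.find rest [rest[j]]).toNat ≤ j := by
      by_contra hgt
      push_neg at hgt
      exact hmin j hgt ((singleton_prefix_iff _ _).mpr
        (by rw [List.head?_drop, List.getElem?_eq_getElem hlt]))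
    have hfx : (j : Int) ≤ PySem.Chars.find rest [rest[j]] := by
      apply hall
      simp only [List.mem_filter, List.mem_map, decide_not]
      exact ⟨⟨rest[j], hp, rfl⟩, by simp; omega⟩
    have hfeq : PySem.Chars.find rest [rest[j]] = (j : Int) := by omega
    apply foldl_min_eq _ _ _ (by exact_mod_cast hjlen) hall
    right
    simp only [List.mem_filter, List.mem_map, decide_not]
    refine ⟨⟨rest[j], hp, hfeq⟩, ?_⟩
    simp
  · have hjl : j = rest.length := by omega
    apply foldl_min_eq _ _ _ (by exact_mod_cast hjlen) hall
    left; omega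

-- ===== VERDICT (by name: the statement is the Claim_ definition above) =====
theorem consume_srcset_url_py_spec : Claim_equal_consume_srcset_url_py := by
  intro value start _hdom hpre
  unfold Pre_consume_srcset_url_py at hpre
  unfold Spec_consume_srcset_url_py consume_srcset_url_py consume_srcset_url_py_alt
  lift start to ℕ using hpre with n
  by_cases hdata : PySem.Chars.lower (PySem.List.slice value.toList (some (n : Int))
      (some ((n : Int) + 5))) = "data:".toList
  · simp only [if_pos hdata]
    have h5 : (n : Int) + 5 = ((n + 5 : ℕ) : Int) := by push_cast; ring
    rw [h5, srcsetScan_eq, PySem.List.slice_from_natCast, srcsetCut_eq]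
  · simp only [if_neg hdata]
    rw [srcsetScan_eq, PySem.List.slice_from_natCast, srcsetCut_eq]
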